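-- pv_equiv track=rewrite | github.com/copyt-spec/boat-ai-test | scripts/build_trifecta_training_csv.py | expand_one_race
-- ===== SOURCE A (Python) =====
-- from typing import Dict, Iterable, List, Optional, Tuple
--
-- def expand_one_race(
--     base_row: Dict[str, str],
--     race_id: str,
--     combos: List[str],
--     y_combo_norm: str,
--     payout_value: str,
--     out_fields: List[str],
-- ) -> Iterable[Dict[str, str]]:
--     """
--     1レース（1行）→120行へ展開
--     """
--     for cb in combos:
--         row = {}
--         # base features
--         for k in out_fields:
--             if k in ("race_id", "combo", "y", "payout"):
--                 continue
--             row[k] = base_row.get(k, "")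
--
--         row["race_id"] = race_id
--         row["combo"] = cb
--         row["y"] = "1" if (y_combo_norm and cb == y_combo_norm) else "0"
--         row["payout"] = payout_value
--         yield row
-- ===== SOURCE B (Python) =====
-- def expand_one_race(base_row, race_id, combos, y_combo_norm, payout_value, out_fields):
--     # Columnar construction: build one column of values per output field, then
--     # transpose the columns into per-combo rows.
--     skip = ("race_id", "combo", "y", "payout")
--     keys = []
--     seen = set()
--     for k in out_fields:
--         if k in skip or k in seen:
--             continue
--         keys.append(k)
--         seen.add(k)
--     n = len(combos)
--     columns = [[base_row.get(k, "")] * n for k in keys]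
--     columns.append([race_id] * n)
--     columns.append(list(combos))
--     columns.append(["1" if (y_combo_norm and cb == y_combo_norm) else "0" for cb in combos])
--     columns.append([payout_value] * n)
--     all_keys = keys + list(skip)
--     for vals in zip(*columns):
--         yield dict(zip(all_keys, vals))
-- ===== Notes on version B (the rewrite author's own statement) =====
-- stated objective: faster
-- what changed: B builds the output column-wise: one deduplicating pass over out_fields yields the key order, then a full column of values is materialised per output field (constant columns built by list repetition for base fields/race_id/payout, the combos list itself, a y-column computed per combo), and rows are obtained by transposing the columns and zipping each tuple with the key list; A instead builds each row's dict independently by rescanning out_fields (skip test plus base_row.get per field) per combo.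
import Mathlib
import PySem

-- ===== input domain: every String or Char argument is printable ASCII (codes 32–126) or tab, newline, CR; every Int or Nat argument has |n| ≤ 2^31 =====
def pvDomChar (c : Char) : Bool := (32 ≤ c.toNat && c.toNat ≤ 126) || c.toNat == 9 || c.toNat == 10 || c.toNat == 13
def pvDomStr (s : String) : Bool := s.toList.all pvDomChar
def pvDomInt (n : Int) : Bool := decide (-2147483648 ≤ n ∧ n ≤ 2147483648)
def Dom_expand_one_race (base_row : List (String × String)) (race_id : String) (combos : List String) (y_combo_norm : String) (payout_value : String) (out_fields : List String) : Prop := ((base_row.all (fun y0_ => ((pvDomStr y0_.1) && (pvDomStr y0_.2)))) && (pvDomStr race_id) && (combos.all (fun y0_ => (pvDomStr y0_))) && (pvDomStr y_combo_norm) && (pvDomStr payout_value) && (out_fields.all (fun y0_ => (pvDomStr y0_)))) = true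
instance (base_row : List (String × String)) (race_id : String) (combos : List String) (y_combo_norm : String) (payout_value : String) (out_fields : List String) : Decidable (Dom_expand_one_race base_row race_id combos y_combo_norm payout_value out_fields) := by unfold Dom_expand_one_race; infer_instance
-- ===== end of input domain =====

-- B builds the rows column-wise (one deduplicated key pass, one value column per field,
-- then a transpose) instead of A's per-combo rescan of out_fields; same asymptotic cost.
-- ===== PORT A =====
-- Port of A: for each combo, rebuild the row dict by scanning out_fields (skipping the
-- four fixed keys), then set race_id/combo/y/payout; the generator's yields become a map.
def expand_one_race (base_row : List (String × String)) (race_id : String) (combos : List String) (y_combo_norm : String) (payout_value : String) (out_fields : List String) : List (List (String × String)) :=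
  combos.map (fun cb =>
    let row : PySem.Dict String String :=
      out_fields.foldl (fun r k =>
        if k == "race_id" || k == "combo" || k == "y" || k == "payout" then r
        else r.insert k ((PySem.Dict.mk base_row).getD k "")) PySem.Dict.empty
    let row := row.insert "race_id" race_id
    let row := row.insert "combo" cb
    let row := row.insert "y" (if !(y_combo_norm == "") && cb == y_combo_norm then "1" else "0")
    let row := row.insert "payout" payout_value
    row.items)

-- ===== PORT B =====
-- zip(*columns): take the heads of all columns while every column is nonempty; [] when
-- there are no columns (exact for Python's zip over lists of strings).
def pyZipStar (cols : List (List String)) : List (List String) :=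
  if h : cols ≠ [] ∧ cols.all (fun c => !c.isEmpty) then
    cols.map (fun c => c.headD "") :: pyZipStar (cols.map List.tail)
  else []
termination_by (cols.headD []).length
decreasing_by
  obtain ⟨hne, hall⟩ := h
  cases cols with
  | nil => exact absurd rfl hne
  | cons c rest =>
    have hc : c ≠ [] := by
      have := (List.all_eq_true.mp hall) c (by simp)
      simpa [List.isEmpty_iff] using this
    cases c with
    | nil => exact absurd rfl hc
    | cons x xs => simp

-- Port of B: one deduplicating pass over out_fields gives the key order; a column of
-- values per output field; rows are the transposed columns zipped with the keys and
-- turned into dicts (yield dict(zip(all_keys, vals))).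
def expand_one_race_alt (base_row : List (String × String)) (race_id : String) (combos : List String) (y_combo_norm : String) (payout_value : String) (out_fields : List String) : List (List (String × String)) :=
  let st := out_fields.foldl
    (fun (st : List String × PySem.Set String) k =>
      if (k == "race_id" || k == "combo" || k == "y" || k == "payout") || st.2.contains k then st
      else (st.1 ++ [k], PySem.Set.add st.2 k))
    ([], PySem.Set.empty)
  let keys := st.1
  let n := combos.length
  let columns : List (List String) :=
    (keys.map (fun k => List.replicate n ((PySem.Dict.mk base_row).getD k "")))
      ++ [List.replicate n race_id,
          combos,
          combos.map (fun cb => if !(y_combo_norm == "") && cb == y_combo_norm then "1" else "0"),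
          List.replicate n payout_value]
  let all_keys := keys ++ ["race_id", "combo", "y", "payout"]
  (pyZipStar columns).map (fun vals =>
    ((all_keys.zip vals).foldl (fun (d : PySem.Dict String String) p => d.insert p.1 p.2)
      PySem.Dict.empty).items)

-- ===== PRECONDITION & SPEC =====
def Spec_expand_one_race (base_row : List (String × String)) (race_id : String) (combos : List String) (y_combo_norm : String) (payout_value : String) (out_fields : List String) (out : List (List (String × String))) : Prop := out = expand_one_race_alt base_row race_id combos y_combo_norm payout_value out_fields
instance (base_row : List (String × String)) (race_id : String) (combos : List String) (y_combo_norm : String) (payout_value : String) (out_fields : List String) (out : List (List (String × String))) : Decidable (Spec_expand_one_race base_row race_id combos y_combo_norm payout_value out_fields out) := by unfold Spec_expand_one_race; infer_instance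

-- ===== CLAIM (what is proved, stated in full; the proofs are below) =====
def Claim_equal_expand_one_race : Prop := ∀ (base_row : List (String × String)) (race_id : String) (combos : List String) (y_combo_norm : String) (payout_value : String) (out_fields : List String), Dom_expand_one_race base_row race_id combos y_combo_norm payout_value out_fields → Spec_expand_one_race base_row race_id combos y_combo_norm payout_value out_fields (expand_one_race base_row race_id combos y_combo_norm payout_value out_fields)

-- ===== LEMMAS AND PROOFS =====

-- Folding with an in-loop skip equals folding over the filtered list.
theorem foldl_skip_eq_foldl_filter {α β : Type} (p : β → Bool) (f : α → β → α) :
    ∀ (l : List β) (init : α),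
      l.foldl (fun r k => if p k then r else f r k) init
        = (l.filter (fun k => !(p k))).foldl f init := by
  intro l
  induction l with
  | nil => intro init; rfl
  | cons x xs ih =>
    intro init
    cases hp : p x <;> simp [List.foldl_cons, hp, ih]

-- B's keys/seen loop keeps its two components equal: both are the Set.add fold.
theorem keysLoop_eq (l : List String) :
    ∀ (s : PySem.Set String),
      l.foldl (fun (st : List String × PySem.Set String) k =>
          if st.2.contains k then st else (st.1 ++ [k], PySem.Set.add st.2 k)) (s, s)
        = (l.foldl PySem.Set.add s, l.foldl PySem.Set.add s) := by
  induction l with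
  | nil => intro s; rfl
  | cons x xs ih =>
    intro s
    by_cases hx : x ∈ s
    · simpa [List.foldl_cons, PySem.Set.add, hx] using ih s
    · simpa [List.foldl_cons, PySem.Set.add, hx] using ih (s ++ [x])

-- A loop of inserts whose value depends only on the key: lookup afterwards.
theorem getD_foldl_insert_const (g : String → String) :
    ∀ (l : List String) (d : PySem.Dict String String) (k : String) (dflt : String),
      (l.foldl (fun r x => r.insert x (g x)) d).getD k dflt
        = if k ∈ l then g k else d.getD k dflt := by
  intro l
  induction l with
  | nil => intro d k dflt; simp
  | cons x xs ih =>
    intro d k dflt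
    rw [List.foldl_cons, ih]
    by_cases hxs : k ∈ xs
    · simp [hxs]
    · by_cases hx : k = x <;> simp [hxs, hx, PySem.Dict.getD_insert]

-- l.map f written as an index map over range (any default, used at in-range indices).
theorem map_eq_map_range {α β : Type} (f : α → β) (d : α) :
    ∀ (l : List α), l.map f = (List.range l.length).map (fun i => f (l.getD i d)) := by
  intro l
  induction l with
  | nil => simp
  | cons x xs ih =>
    simp [List.range_succ_eq_map, ih, Function.comp]

-- zip(*cols) for a nonempty list of equal-length columns is the index-by-index transpose.
theorem pyZipStar_of_length :
    ∀ (n : Nat) (cols : List (List String)), cols ≠ [] → (∀ c ∈ cols, c.length = n) →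
      pyZipStar cols = (List.range n).map (fun i => cols.map (fun c => c.getD i "")) := by
  intro n
  induction n with
  | zero =>
    intro cols hne hlen
    rw [pyZipStar, dif_neg]
    · simp
    · rintro ⟨-, hall⟩
      obtain ⟨c, hc⟩ := List.exists_mem_of_ne_nil cols hne
      have h1 := (List.all_eq_true.mp hall) c hc
      have h2 := hlen c hc
      cases c with
      | nil => simp at h1
      | cons a as => simp at h2
  | succ m ih =>
    intro cols hne hlen
    rw [pyZipStar]
    have hall : cols.all (fun c => !c.isEmpty) = true := by
      apply List.all_eq_true.mpr
      intro c hc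
      have hlc := hlen c hc
      cases c with
      | nil => simp at hlc
      | cons a as => simp
    rw [dif_pos ⟨hne, hall⟩]
    have htails : ∀ c ∈ cols.map List.tail, c.length = m := by
      intro c hc
      obtain ⟨c', hc', rfl⟩ := List.mem_map.mp hc
      have hlc := hlen c' hc'
      cases c' with
      | nil => simp at hlc
      | cons a as => simp at hlc ⊢; omega
    rw [ih (cols.map List.tail) (by simpa using hne) htails]
    rw [List.range_succ_eq_map, List.map_cons, List.map_map]
    congr 1
    · apply List.map_congr_left
      intro c hc
      have hlc := hlen c hc
      cases c with
      | nil => simp at hlc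
      | cons a as => simp
    · apply List.map_congr_left
      intro i hi
      simp only [Function.comp, List.map_map]
      apply List.map_congr_left
      intro c hc
      have hlc := hlen c hc
      cases c with
      | nil => simp at hlc
      | cons a as => simp

-- An insert-only fold never creates a key absent from both the seed dict and the list.
theorem contains_foldl_insert_of_not_mem {ν : Type}
    (v : String → ν) (q : String) :
    ∀ (l : List String) (d : PySem.Dict String ν),
      d.contains q = false → q ∉ l →
      (l.foldl (fun r k => r.insert k (v k)) d).contains q = false := by
  intro l
  induction l with
  | nil => intro d hd _; exact hd
  | cons x xs ih =>
    intro d hd hq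
    have hx : q ≠ x := fun h => hq (by simp [h])
    have : (d.insert x (v x)).contains q = false := by
      rw [PySem.Dict.contains_insert]
      simp [hx, hd]
    exact ih _ this (fun h => hq (List.mem_cons_of_mem _ h))

-- The four fixed keys are not in the filtered key set.
theorem not_mem_filtered_of_special (out_fields : List String) (q : String)
    (hq : (q == "race_id" || q == "combo" || q == "y" || q == "payout") = true) :
    q ∉ out_fields.filter
      (fun k => !(k == "race_id" || k == "combo" || k == "y" || k == "payout")) := by
  intro hmem
  have := List.of_mem_filter hmem
  simp only [hq] at this
  exact absurd this (by simp)

theorem expand_one_race_spec : Claim_equal_expand_one_race := by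
  intro base_row race_id combos y_combo_norm payout_value out_fields _
  unfold Spec_expand_one_race expand_one_race expand_one_race_alt
  simp only []
  trans ((List.range combos.length).map (fun i =>
      (PySem.Set.ofList (out_fields.filter
          (fun k => !(k == "race_id" || k == "combo" || k == "y" || k == "payout")))).map
        (fun k => (k, (PySem.Dict.mk base_row).getD k ""))
      ++ [("race_id", race_id), ("combo", combos.getD i ""),
          ("y", if !(y_combo_norm == "") && combos.getD i "" == y_combo_norm then "1" else "0"),
          ("payout", payout_value)]))
  -- ---------- A side ----------
  · rw [map_eq_map_range _ "" combos]
    apply List.map_congr_left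
    intro i _
    rw [foldl_skip_eq_foldl_filter
          (fun k => k == "race_id" || k == "combo" || k == "y" || k == "payout")
          (fun (r : PySem.Dict String String) k =>
            r.insert k ((PySem.Dict.mk base_row).getD k ""))]
    set F := out_fields.filter
      (fun k => !(k == "race_id" || k == "combo" || k == "y" || k == "payout")) with hFdef
    set T := F.foldl (fun (r : PySem.Dict String String) k =>
        r.insert k ((PySem.Dict.mk base_row).getD k "")) PySem.Dict.empty with hT
    have habs : ∀ q : String,
        (q == "race_id" || q == "combo" || q == "y" || q == "payout") = true →
        T.contains q = false := by
      intro q hq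
      rw [hT]
      exact contains_foldl_insert_of_not_mem _ q F PySem.Dict.empty
        (PySem.Dict.contains_empty q) (not_mem_filtered_of_special out_fields q hq)
    have h1 := habs "race_id" (by decide)
    have h2 := habs "combo" (by decide)
    have h3 := habs "y" (by decide)
    have h4 := habs "payout" (by decide)
    rw [PySem.Dict.items_insert_of_not_contains _ _
          (by simp [PySem.Dict.contains_insert, h4]),
        PySem.Dict.items_insert_of_not_contains _ _
          (by simp [PySem.Dict.contains_insert, h3]),
        PySem.Dict.items_insert_of_not_contains _ _
          (by simp [PySem.Dict.contains_insert, h2]),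
        PySem.Dict.items_insert_of_not_contains _ _ h1]
    -- T.items is the deduplicated filtered key list paired with its base values
    have hnodup : T.keys.Nodup := by
      rw [hT]
      exact PySem.Dict.nodup_keys_foldl_insert F _ PySem.Dict.empty
        PySem.Dict.nodup_keys_empty
    have hkeys : T.keys = PySem.Set.ofList F := by
      rw [hT, PySem.Dict.keys_foldl_insert]
      rfl
    have hitems : T.items = (PySem.Set.ofList F).map
        (fun k => (k, (PySem.Dict.mk base_row).getD k "")) := by
      rw [PySem.Dict.items_eq_map_keys T hnodup "", hkeys]
      apply List.map_congr_left
      intro k hk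
      have hkF : k ∈ F := (PySem.Set.mem_ofList F k).mp hk
      rw [hT, getD_foldl_insert_const, if_pos hkF]
    rw [hitems]
    simp
  -- ---------- B side ----------
  · symm
    -- the keys/seen loop computes the deduplicated filtered field list
    have hsplit : (fun (st : List String × PySem.Set String) k =>
        if (k == "race_id" || k == "combo" || k == "y" || k == "payout") || st.2.contains k
        then st else (st.1 ++ [k], PySem.Set.add st.2 k))
      = (fun (st : List String × PySem.Set String) k =>
        if (k == "race_id" || k == "combo" || k == "y" || k == "payout") then st
        else (if st.2.contains k then st else (st.1 ++ [k], PySem.Set.add st.2 k))) := by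
      funext st k
      cases (k == "race_id" || k == "combo" || k == "y" || k == "payout") <;> simp
    rw [hsplit, foldl_skip_eq_foldl_filter]
    set F := out_fields.filter
      (fun k => !(k == "race_id" || k == "combo" || k == "y" || k == "payout")) with hFdef
    set K := PySem.Set.ofList F with hKdef
    have hloop : F.foldl (fun (st : List String × PySem.Set String) k =>
        if st.2.contains k then st else (st.1 ++ [k], PySem.Set.add st.2 k))
        ([], PySem.Set.empty) = (K, K) := keysLoop_eq F PySem.Set.empty
    rw [hloop]
    set g : String → String := fun k => (PySem.Dict.mk base_row).getD k "" with hgdef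
    set n := combos.length with hn
    set yf : String → String := fun cb =>
      if !(y_combo_norm == "") && cb == y_combo_norm then "1" else "0" with hyf
    -- every column has length n
    have hlen : ∀ c ∈ (K.map (fun k => List.replicate n (g k)))
        ++ [List.replicate n race_id, combos, combos.map yf, List.replicate n payout_value],
        c.length = n := by
      intro c hc
      rcases List.mem_append.mp hc with hc | hc
      · obtain ⟨k, _, rfl⟩ := List.mem_map.mp hc
        simp
      · simp only [List.mem_cons] at hc
        rcases hc with rfl | rfl | rfl | rfl | h
        · simp [hn]
        · simp [hn]
        · simp [hn]
        · simp [hn]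
        · simp at h
    rw [pyZipStar_of_length n _ (by simp) hlen]
    rw [List.map_map]
    apply List.map_congr_left
    intro i hi
    have hin : i < n := List.mem_range.mp hi
    simp only [Function.comp]
    -- the i-th transposed tuple
    have hrep : ∀ x : String, (List.replicate n x).getD i "" = x := by
      intro x
      rw [List.getD_eq_getElem?_getD, List.getElem?_replicate, if_pos hin]
      rfl
    have hi2 : i < combos.length := hn ▸ hin
    have hmapget : (combos.map yf).getD i "" = yf (combos.getD i "") := by
      simp [List.getD_eq_getElem?_getD, List.getElem?_eq_getElem hi2]
    have hvals : ((K.map (fun k => List.replicate n (g k)))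
        ++ [List.replicate n race_id, combos, combos.map yf,
            List.replicate n payout_value]).map (fun (c : List String) => c.getD i "")
        = K.map g
          ++ [race_id, combos.getD i "", yf (combos.getD i ""), payout_value] := by
      rw [List.map_append, List.map_map]
      congr 1
      · apply List.map_congr_left
        intro k _
        simp only [Function.comp]
        exact hrep (g k)
      · simp only [List.map_cons, List.map_nil, hrep, hmapget]
    rw [hvals]
    -- dict(zip(all_keys, vals)) over fresh distinct keys is the pair list itself
    set pairs : List (String × String) := K.map (fun k => (k, g k))
      ++ [("race_id", race_id), ("combo", combos.getD i ""),
          ("y", yf (combos.getD i "")), ("payout", payout_value)] with hpairs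
    have hzip : (K ++ ["race_id", "combo", "y", "payout"]).zip
        (K.map g
          ++ [race_id, combos.getD i "", yf (combos.getD i ""), payout_value]) = pairs := by
      rw [List.zip_append (by simp), hpairs]
      congr 1
      exact (List.map_prod_left_eq_zip).symm
    rw [hzip]
    have hfst : pairs.map Prod.fst = K ++ ["race_id", "combo", "y", "payout"] := by
      have hcomp : (Prod.fst ∘ fun k : String => (k, g k)) = id := rfl
      rw [hpairs, List.map_append, List.map_map, hcomp, List.map_id]
      rfl
    have hnodup : (pairs.map Prod.fst).Nodup := by
      rw [hfst, List.nodup_append]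
      refine ⟨PySem.Set.nodup_ofList F, by decide, ?_⟩
      intro a haK b hb
      have haF : a ∈ F := (PySem.Set.mem_ofList F a).mp haK
      have hnp := List.of_mem_filter haF
      simp only [Bool.not_eq_true', Bool.or_eq_false_iff, beq_eq_false_iff_ne] at hnp
      obtain ⟨⟨⟨hq1, hq2⟩, hq3⟩, hq4⟩ := hnp
      simp only [List.mem_cons, List.not_mem_nil, or_false] at hb
      rcases hb with rfl | rfl | rfl | rfl <;> assumption
    have hfold := PySem.Dict.items_foldl_insert_fresh
      (l := pairs) (k := Prod.fst) (v := Prod.snd) (d := PySem.Dict.empty)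
      (by intro a _; exact PySem.Dict.contains_empty a.1) hnodup
    rw [show (PySem.Dict.empty : PySem.Dict String String).items = [] from rfl,
        List.nil_append] at hfold
    calc ((pairs.foldl (fun (d : PySem.Dict String String) p => d.insert p.1 p.2)
            PySem.Dict.empty).items)
        = pairs.map (fun a => (a.1, a.2)) := hfold
      _ = pairs := by simp
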